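-- pv_equiv track=rewrite | github.com/nataliainformatica/PYTHON2025_2026 | retos/ejercicio6.py | convert_vowels2
-- ===== SOURCE A (Python) =====
-- def convert_vowels2(text):
--     vowels = "aeiouAEIOU"
--     result = ""
--
--     for char in text:
--         if char in vowels:
--             result += char
--         elif charIsAlphabetic(char):
--         #elif char.isalpha():
--             # result += char.lower()
--             result += lower_manual(char)
--         else:
--             result += char
--
--     return result
--
-- def charIsAlphabetic(char):
--     return ('a' <= char <= 'z') or ('A' <= char <= 'Z')
--
-- def lower_manual(char):
--     # Si es mayúscula A–Z, convertirla
--     #'a' - 'A' = 32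
--     if 'A' <= char <= 'Z':
--         return chr(ord(char) + 32)
--     return char
-- ===== SOURCE B (Python) =====
-- _TABLE = str.maketrans({c: chr(ord(c) + 32) for c in "BCDFGHJKLMNPQRSTVWXYZ"})
--
-- def convert_vowels2(text):
--     return text.translate(_TABLE)
-- ===== Notes on version B (the rewrite author's own statement) =====
-- stated objective: faster
-- what changed: Replaced the per-character if/elif/else loop with string accumulation by a translation table built once with str.maketrans over the 21 uppercase ASCII consonants, applied via str.translate in one C-level pass.
import Mathlib
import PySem

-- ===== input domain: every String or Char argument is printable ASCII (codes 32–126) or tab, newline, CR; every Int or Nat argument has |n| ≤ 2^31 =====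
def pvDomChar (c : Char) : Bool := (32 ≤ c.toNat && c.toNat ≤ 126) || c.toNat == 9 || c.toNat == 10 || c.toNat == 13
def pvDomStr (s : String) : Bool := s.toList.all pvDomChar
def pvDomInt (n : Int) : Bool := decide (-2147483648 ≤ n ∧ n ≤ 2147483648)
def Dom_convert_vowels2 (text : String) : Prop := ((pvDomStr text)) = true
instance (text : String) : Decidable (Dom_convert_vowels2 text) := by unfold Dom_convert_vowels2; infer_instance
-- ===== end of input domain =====

-- B replaces A's per-character branch loop by a precomputed uppercase-consonant
-- translation table applied in one pass (idiomatic; return value identical).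


-- ===== PORT A =====
def charIsAlphabetic (char : Char) : Bool :=
  ('a' ≤ char && char ≤ 'z') || ('A' ≤ char && char ≤ 'Z')

def lower_manual (char : Char) : Char :=
  if 'A' ≤ char && char ≤ 'Z' then Char.ofNat (char.toNat + 32) else char

def convert_vowels2 (text : String) : String :=
  String.mk (text.toList.foldl
    (fun result char =>
      if char ∈ "aeiouAEIOU".toList then result ++ [char]
      else if charIsAlphabetic char then result ++ [lower_manual char]
      else result ++ [char]) [])

-- ===== PORT B =====
-- translation table: dict from ordinal of each uppercase consonant to its lowercase char
def pvTable : PySem.Dict Int Char :=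
  "BCDFGHJKLMNPQRSTVWXYZ".toList.foldl
    (fun d c => d.insert (c.toNat : Int) (Char.ofNat (c.toNat + 32))) PySem.Dict.empty

def convert_vowels2_alt (text : String) : String :=
  String.mk (text.toList.map (fun c => (pvTable.get? (c.toNat : Int)).getD c))

-- ===== PRECONDITION & SPEC =====
def Spec_convert_vowels2 (text : String) (out : String) : Prop := out = convert_vowels2_alt text
instance (text : String) (out : String) : Decidable (Spec_convert_vowels2 text out) := by unfold Spec_convert_vowels2; infer_instance

-- ===== CLAIM (what is proved, stated in full; the proofs are below) =====
def Claim_equal_convert_vowels2 : Prop := ∀ (text : String), Dom_convert_vowels2 text → Spec_convert_vowels2 text (convert_vowels2 text)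

-- ===== LEMMAS AND PROOFS =====

-- A's per-character result
def pvStepA (char : Char) : Char :=
  if char ∈ "aeiouAEIOU".toList then char
  else if charIsAlphabetic char then lower_manual char
  else char

-- B's per-character result
def pvStepB (c : Char) : Char := (pvTable.get? (c.toNat : Int)).getD c

lemma foldl_eq_map (l acc : List Char) :
    l.foldl (fun result char =>
      if char ∈ "aeiouAEIOU".toList then result ++ [char]
      else if charIsAlphabetic char then result ++ [lower_manual char]
      else result ++ [char]) acc = acc ++ l.map pvStepA := by
  induction l generalizing acc with
  | nil => simp
  | cons c t ih =>
    simp only [List.foldl_cons, List.map_cons, ih, pvStepA]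
    split_ifs <;> simp

set_option maxRecDepth 4000 in
lemma step_eq_fin : ∀ n : Fin 127, pvStepA (Char.ofNat n.val) = pvStepB (Char.ofNat n.val) := by
  decide

lemma step_eq (c : Char) (h : pvDomChar c = true) : pvStepA c = pvStepB c := by
  have hle : c.toNat ≤ 126 := by
    simp only [pvDomChar, Bool.or_eq_true, Bool.and_eq_true, decide_eq_true_eq, beq_iff_eq] at h
    omega
  have hc : Char.ofNat c.toNat = c := Char.ofNat_toNat c
  have := step_eq_fin ⟨c.toNat, Nat.lt_of_le_of_lt hle (by norm_num)⟩
  simpa [hc] using this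

-- ===== VERDICT (by name: the statement is the Claim_ definition above) =====
theorem convert_vowels2_spec : Claim_equal_convert_vowels2 := by
  intro text hdom
  unfold Spec_convert_vowels2 convert_vowels2 convert_vowels2_alt
  rw [foldl_eq_map]
  simp only [List.nil_append]
  congr 1
  apply List.map_congr_left
  intro c hc
  have : pvDomChar c = true := by
    have := hdom
    unfold Dom_convert_vowels2 pvDomStr at this
    exact (List.all_eq_true.mp this) c hc
  exact step_eq c this
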